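-- pv_equiv track=rewrite | github.com/SonoDavid/python-ericsteegmans | CH14_loop_invariants/LongestPlateau.py | find_longest_plateau
-- ===== SOURCE A (Python) =====
-- def find_longest_plateau(seq):
--
--     """
--     Return the index of the longest plateau in the given sequence.
--     - A plateau is defined as a sequence of successive elements that are
--       identical.
--     """
--
--     start_longest_so_far = 0
--     length_longest_so_far = 0
--     i = 0
--
--     # INVARIANT
--     #   The longest plateau in seq[0:i] starts at position
--     #   start_longest_so_far and has a length of
--     #   length_longest_so_far
--     # VARIANT: len(seq) - i
--     #
--     while len(seq) - i > length_longest_so_far: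
--
--         length_current_plateau = length_plateau_at(seq, i)
--
--         if length_current_plateau > length_longest_so_far:
--             start_longest_so_far = i
--             length_longest_so_far = length_current_plateau
--
--         i += length_current_plateau
--
--     return start_longest_so_far
--
-- def length_plateau_at(seq, start):
--
--     """
--     Return the length of the plateau starting at the given position in the
--     given sequence.
--     - All elements in seq[start:start+result] are equal, and either
--       start+result is just beyond the last element of the sequence or
--       the element at position start+result is different from the element
--       at position start.
--     """
--
--     length = 1
--
--     # INVARIANT
--     #   All elements in seq[start:start+length] are equal.
--     # VARIANT: len(seq) - length
--     #
--     while (start+length < len(seq)) and\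
--             (seq[start] == seq[start+length]):
--         length += 1
--
--     return length
-- ===== SOURCE B (Python) =====
-- def find_longest_plateau(seq):
--     cur_start = 0
--     cur_len = 0
--     best_start = 0
--     best_len = 0
--     for i, x in enumerate(seq):
--         if cur_len > 0 and seq[cur_start] == x:
--             cur_len += 1
--         else:
--             cur_start = i
--             cur_len = 1
--         if cur_len > best_len:
--             best_start = cur_start
--             best_len = cur_len
--     return best_start
-- ===== Notes on version B (the rewrite author's own statement) =====
-- stated objective: simpler
-- what changed: Replaces the helper function and the plateau-jumping outer while-loop with one flat enumerate pass that maintains current-run and best-run (start,length) counters.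
import Mathlib
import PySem

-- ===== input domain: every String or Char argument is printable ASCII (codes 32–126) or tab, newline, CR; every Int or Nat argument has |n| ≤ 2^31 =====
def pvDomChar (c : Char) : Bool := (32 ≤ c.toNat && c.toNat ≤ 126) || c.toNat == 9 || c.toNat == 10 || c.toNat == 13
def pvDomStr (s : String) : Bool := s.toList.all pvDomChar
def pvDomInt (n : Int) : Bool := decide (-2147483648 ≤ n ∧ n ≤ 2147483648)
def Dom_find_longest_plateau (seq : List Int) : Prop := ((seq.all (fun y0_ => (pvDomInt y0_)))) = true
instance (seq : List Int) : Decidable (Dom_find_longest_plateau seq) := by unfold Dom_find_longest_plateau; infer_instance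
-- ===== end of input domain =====

-- B replaces A's helper function and plateau-jumping outer while-loop by one flat
-- enumerate pass with current-run/best-run counters (objective: simpler).

-- ===== PORT A =====
-- length_plateau_at: the inner while-loop as structural recursion on `length`.
-- (Python indexes seq[start], seq[start+length] with indices that are always in
-- range at every call site; `l[i]?` equality is exact there.)
def length_plateau_at (seq : List Int) (start : Nat) (length : Nat) : Nat :=
  if h : start + length < seq.length ∧ seq[start]? = seq[start + length]? then
    length_plateau_at seq start (length + 1)
  else
    length
termination_by seq.length - length
decreasing_by omega

theorem le_length_plateau_at (seq : List Int) (start len : Nat) :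
    len ≤ length_plateau_at seq start len := by
  fun_induction length_plateau_at seq start len with
  | case1 len h ih => omega
  | case2 len h => exact le_refl _

-- the outer while-loop of A (i, start/length of longest so far; Python's
-- `len(seq) - i` is our Nat subtraction: i ≤ len(seq) throughout, so exact)
def flp_loop (seq : List Int) (start_longest len_longest i : Nat) : Nat :=
  if h : seq.length - i > len_longest then
    let L := length_plateau_at seq i 1
    if L > len_longest then flp_loop seq i L (i + L)
    else flp_loop seq start_longest len_longest (i + L)
  else start_longest
termination_by seq.length - i
decreasing_by
  · have : 1 ≤ length_plateau_at seq i 1 := le_length_plateau_at seq i 1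
    omega
  · have : 1 ≤ length_plateau_at seq i 1 := le_length_plateau_at seq i 1
    omega

def find_longest_plateau (seq : List Int) : Int :=
  (flp_loop seq 0 0 0 : Int)

-- ===== PORT B =====
-- one enumerate pass; state = (cur_start, cur_len, best_start, best_len)
def flp_step (seq : List Int) (s : Int × Int × Int × Int) (p : Int × Int) :
    Int × Int × Int × Int :=
  match s, p with
  | (curS, curL, bestS, bestL), (i, x) =>
    let c := if curL > 0 && (PySem.List.pyGetD seq curS 0 == x) then (curS, curL + 1)
             else (i, (1 : Int))
    if c.2 > bestL then (c.1, c.2, c.1, c.2) else (c.1, c.2, bestS, bestL)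

def find_longest_plateau_alt (seq : List Int) : Int :=
  ((PySem.List.enumerate seq).foldl (flp_step seq) (0, 0, 0, 0)).2.2.1

-- ===== PRECONDITION & SPEC =====
def Spec_find_longest_plateau (seq : List Int) (out : Int) : Prop := out = find_longest_plateau_alt seq
instance (seq : List Int) (out : Int) : Decidable (Spec_find_longest_plateau seq out) := by unfold Spec_find_longest_plateau; infer_instance

-- ===== CLAIM (what is proved, stated in full; the proofs are below) =====
def Claim_equal_find_longest_plateau : Prop := ∀ (seq : List Int), Dom_find_longest_plateau seq → Spec_find_longest_plateau seq (find_longest_plateau seq)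

-- ===== LEMMAS AND PROOFS =====

-- (proof-only) reference recursion, run by run, mirroring A's outer loop on seq.drop i
def refA (l : List Int) (i bs bl : Nat) : Nat :=
  if h : l.length > bl then
    match hl : l with
    | [] => bs   -- unreachable: l ≠ []
    | x :: xs =>
      let L := 1 + (xs.takeWhile (fun y => y == x)).length
      if L > bl then refA (l.drop L) (i + L) i L
      else refA (l.drop L) (i + L) bs bl
  else bs
termination_by l.length
decreasing_by all_goals subst hl; simp only [List.length_drop, List.length_cons]; omega

-- (proof-only) reference recursion, run by run, mirroring B's fold (no early exit)
def refB (l : List Int) (i bs bl : Int) : Int :=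
  match l with
  | [] => bs
  | x :: xs =>
    let L := 1 + (xs.takeWhile (fun y => y == x)).length
    refB ((x :: xs).drop L) (i + (L : Int)) (if (L : Int) > bl then i else bs)
      (max (L : Int) bl)
termination_by l.length
decreasing_by simp only [List.length_drop, List.length_cons]; omega

theorem length_plateau_at_spec (seq : List Int) (start len : Nat) (hs : start < seq.length) :
    length_plateau_at seq start len
      = len + ((seq.drop (start + len)).takeWhile (fun y => y == seq.getD start 0)).length := by
  fun_induction length_plateau_at seq start len with
  | case1 len h ih =>
    obtain ⟨hlt, heq⟩ := h
    rw [List.getElem?_eq_getElem hs, List.getElem?_eq_getElem hlt, Option.some_inj] at heq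
    rw [List.drop_eq_getElem_cons hlt, List.takeWhile_cons]
    have hp : (seq[start + len] == seq.getD start 0) = true := by
      simp [List.getD_eq_getElem?_getD, List.getElem?_eq_getElem hs, heq]
    rw [hp]
    simp only [if_true, List.length_cons]
    rw [ih]
    have : start + (len + 1) = start + len + 1 := by omega
    rw [this]
    omega
  | case2 len h =>
    rcases Nat.lt_or_ge (start + len) seq.length with hlt | hge
    · have heq : ¬ (seq[start]? = seq[start + len]?) := by tauto
      rw [List.getElem?_eq_getElem hs, List.getElem?_eq_getElem hlt, Option.some_inj] at heq
      rw [List.drop_eq_getElem_cons hlt, List.takeWhile_cons]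
      have hp : (seq[start + len] == seq.getD start 0) = false := by
        simp [List.getD_eq_getElem?_getD, List.getElem?_eq_getElem hs]
        intro hc; exact absurd hc.symm heq
      rw [hp]
      simp
    · rw [List.drop_eq_nil_of_le hge]
      simp

theorem refA_stop (l : List Int) (i bs bl : Nat) (h : ¬ l.length > bl) :
    refA l i bs bl = bs := by
  rw [refA, dif_neg h]

theorem refA_cons (x : Int) (xs : List Int) (i bs bl : Nat) (h : (x :: xs).length > bl) :
    refA (x :: xs) i bs bl
      = (if 1 + (xs.takeWhile (fun y => y == x)).length > bl
         then refA ((x :: xs).drop (1 + (xs.takeWhile (fun y => y == x)).length))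
                (i + (1 + (xs.takeWhile (fun y => y == x)).length)) i
                (1 + (xs.takeWhile (fun y => y == x)).length)
         else refA ((x :: xs).drop (1 + (xs.takeWhile (fun y => y == x)).length))
                (i + (1 + (xs.takeWhile (fun y => y == x)).length)) bs bl) := by
  rw [refA, dif_pos h]

theorem flp_loop_eq_refA (seq : List Int) (i bs bl : Nat) :
    flp_loop seq bs bl i = refA (seq.drop i) i bs bl := by
  fun_induction flp_loop seq bs bl i with
  | case1 bs bl i hc L hgt ih =>
    have hi : i < seq.length := by omega
    have hdrop : seq.drop i = seq[i] :: seq.drop (i + 1) := List.drop_eq_getElem_cons hi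
    have hLe : L = 1 + ((seq.drop (i + 1)).takeWhile (fun y => y == seq[i])).length := by
      show length_plateau_at seq i 1 = _
      rw [length_plateau_at_spec seq i 1 hi]
      simp [List.getD_eq_getElem?_getD, List.getElem?_eq_getElem hi]
    rw [ih, hdrop, refA_cons _ _ _ _ _ (by simp [List.length_drop]; omega), ← hLe,
      if_pos hgt, ← hdrop, List.drop_drop]
  | case2 bs bl i hc L hgt ih =>
    have hi : i < seq.length := by omega
    have hdrop : seq.drop i = seq[i] :: seq.drop (i + 1) := List.drop_eq_getElem_cons hi
    have hLe : L = 1 + ((seq.drop (i + 1)).takeWhile (fun y => y == seq[i])).length := by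
      show length_plateau_at seq i 1 = _
      rw [length_plateau_at_spec seq i 1 hi]
      simp [List.getD_eq_getElem?_getD, List.getElem?_eq_getElem hi]
    rw [ih, hdrop, refA_cons _ _ _ _ _ (by simp [List.length_drop]; omega), ← hLe,
      if_neg hgt, ← hdrop, List.drop_drop]
  | case3 bs bl i hc =>
    exact (refA_stop _ _ _ _ (by simp [List.length_drop]; omega)).symm

theorem refB_stall (l : List Int) (i bs bl : Int) (h : (l.length : Int) ≤ bl) :
    refB l i bs bl = bs := by
  fun_induction refB l i bs bl with
  | case1 i bs bl => rfl
  | case2 i bs bl x xs L ih =>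
    have hL : L = 1 + (xs.takeWhile (fun y => y == x)).length := rfl
    have ht := congrArg List.length (List.takeWhile_append_dropWhile
      (p := fun y => y == x) (l := xs))
    simp only [List.length_append] at ht
    simp only [List.length_cons] at h
    have hLbl : ¬ ((L : Int) > bl) := by rw [hL]; push_cast; omega
    rw [dif_neg hLbl] at ih
    rw [if_neg hLbl]
    apply ih
    simp only [List.length_drop, List.length_cons]
    rw [hL]
    push_cast
    omega

theorem refA_eq_refB (l : List Int) (i bs bl : Nat) :
    ((refA l i bs bl : Nat) : Int) = refB l (i : Int) (bs : Int) (bl : Int) := by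
  fun_induction refA l i bs bl with
  | case1 i bs bl h => simp at h
  | case2 i bs bl x xs h L hgt ih =>
    rw [refB]
    rw [if_pos (by exact_mod_cast hgt), max_eq_left (by exact_mod_cast Nat.le_of_lt hgt)]
    rw [ih, Nat.cast_add]
  | case3 i bs bl x xs h L hgt ih =>
    rw [refB]
    rw [if_neg (by exact_mod_cast hgt), max_eq_right (by exact_mod_cast Nat.le_of_not_lt hgt)]
    rw [ih, Nat.cast_add]
  | case4 l i bs bl h =>
    exact (refB_stall l _ _ _ (by exact_mod_cast Nat.le_of_not_lt h)).symm

theorem flp_fold_run (seq : List Int) (v : Int) (L : Nat) :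
    ∀ (k i : Nat) (bS bL : Int), seq.getD i 0 = v → 1 ≤ k → (k : Int) ≤ bL →
    List.foldl (flp_step seq) ((i : Int), (k : Int), bS, bL)
        (PySem.List.enumerate (List.replicate L v) ((i : Int) + (k : Int)))
      = ((i : Int), (k : Int) + (L : Int),
         (if (k : Int) + (L : Int) > bL then (i : Int) else bS),
         max ((k : Int) + (L : Int)) bL) := by
  induction L with
  | zero =>
    intro k i bS bL hv hk hkb
    simp only [List.replicate_zero, PySem.List.enumerate_nil, List.foldl_nil,
      Nat.cast_zero, add_zero]
    rw [if_neg (not_lt.mpr hkb), max_eq_right hkb]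
  | succ L ihL =>
    intro k i bS bL hv hk hkb
    rw [List.replicate_succ, PySem.List.enumerate_cons, List.foldl_cons]
    have hstep : flp_step seq ((i : Int), (k : Int), bS, bL) ((i : Int) + (k : Int), v)
        = ((i : Int), (k : Int) + 1, if (k : Int) + 1 > bL then (i : Int) else bS,
           max ((k : Int) + 1) bL) := by
      have hc : (((k : Int) > 0 : Bool) && (PySem.List.pyGetD seq (i : Int) 0 == v)) = true := by
        simp only [PySem.List.pyGetD_natCast, Bool.and_eq_true, decide_eq_true_eq,
          beq_iff_eq]
        constructor
        · omega
        · simpa [List.getD] using hv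
      simp only [flp_step, hc]
      by_cases hb : (k : Int) + 1 > bL
      · simp [hb, max_eq_left (by omega : bL ≤ (k : Int) + 1)]
      · simp [hb, max_eq_right (by omega : (k : Int) + 1 ≤ bL)]
    rw [hstep]
    have hst : (i : Int) + (k : Int) + 1 = (i : Int) + ((k + 1 : Nat) : Int) := by
      push_cast; ring
    rw [hst]
    have hih := ihL (k + 1) i (if (k : Int) + 1 > bL then (i : Int) else bS)
      (max ((k : Int) + 1) bL) hv (by omega) (by push_cast; omega)
    push_cast at hih ⊢
    rw [hih]
    simp only [Prod.mk.injEq]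
    refine ⟨trivial, by ring, ?_, by omega⟩
    by_cases h1 : (k : Int) + 1 + (L : Int) > max ((k : Int) + 1) bL
    · rw [if_pos h1, if_pos (by omega)]
    · rw [if_neg h1]
      by_cases h2 : (k : Int) + 1 > bL
      · rw [if_pos h2, if_pos (by omega)]
      · rw [if_neg h2, if_neg (by omega)]

theorem flp_fold_outer (seq : List Int) : ∀ (n : Nat) (l : List Int) (i : Nat)
    (curS curL bS bL : Int), l.length ≤ n → l = seq.drop i →
    (l ≠ [] → ((curL > 0 : Bool) && (PySem.List.pyGetD seq curS 0 == seq.getD i 0)) = false) →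
    (List.foldl (flp_step seq) (curS, curL, bS, bL)
        (PySem.List.enumerate l (i : Int))).2.2.1
      = refB l (i : Int) bS bL := by
  intro n
  induction n with
  | zero =>
    intro l i curS curL bS bL hn hl hf
    have : l = [] := List.length_eq_zero_iff.mp (by omega)
    subst this
    simp [PySem.List.enumerate_nil, refB]
  | succ n ih =>
    intro l i curS curL bS bL hn hl hf
    rcases l with _ | ⟨x, xs⟩
    · simp [PySem.List.enumerate_nil, refB]
    · have hlen := congrArg List.length hl
      simp only [List.length_cons, List.length_drop] at hlen
      have hi : i < seq.length := by omega
      have hdrop : seq.drop i = seq[i] :: seq.drop (i + 1) := List.drop_eq_getElem_cons hi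
      rw [hdrop] at hl
      have hx : x = seq[i] := (List.cons.injEq _ _ _ _ ▸ hl).1
      have hxs : xs = seq.drop (i + 1) := (List.cons.injEq _ _ _ _ ▸ hl).2
      have hgdi : seq.getD i 0 = x := by
        rw [hx]; simp [List.getD_eq_getElem?_getD, List.getElem?_eq_getElem hi]
      have ht : xs.takeWhile (fun y => y == x)
          = List.replicate (xs.takeWhile (fun y => y == x)).length x :=
        List.eq_replicate_iff.mpr ⟨rfl, fun b hb => by
          simpa [beq_iff_eq] using List.mem_takeWhile_imp hb⟩
      have hrest : xs.drop (xs.takeWhile (fun y => y == x)).length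
          = xs.dropWhile (fun y => y == x) := by
        have hdl := List.drop_left (l₁ := xs.takeWhile (fun y => y == x))
          (l₂ := xs.dropWhile (fun y => y == x))
        rwa [List.takeWhile_append_dropWhile] at hdl
      have hsplitxs : xs = List.replicate (xs.takeWhile (fun y => y == x)).length x
          ++ xs.drop (xs.takeWhile (fun y => y == x)).length := by
        conv_lhs => rw [← List.takeWhile_append_dropWhile (p := fun y => y == x) (l := xs)]
        rw [hrest, ← ht]
      set tl := (xs.takeWhile (fun y => y == x)).length with htl
      rw [PySem.List.enumerate_cons, List.foldl_cons]
      have hstep1 : flp_step seq (curS, curL, bS, bL) ((i : Int), x)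
          = ((i : Int), 1, if (1 : Int) > bL then (i : Int) else bS, max 1 bL) := by
        have hcond := hf (List.cons_ne_nil x xs)
        rw [hgdi] at hcond
        simp only [flp_step, hcond]
        by_cases hb : (1 : Int) > bL
        · simp [hb, max_eq_left (by omega : bL ≤ (1 : Int))]
        · simp [hb, max_eq_right (by omega : (1 : Int) ≤ bL)]
      rw [hstep1]
      conv_lhs => rw [hsplitxs]
      rw [PySem.List.enumerate_append, List.foldl_append]
      have hrun := flp_fold_run seq x tl 1 i
        (if (1 : Int) > bL then (i : Int) else bS) (max 1 bL)
        hgdi le_rfl (by simp)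
      push_cast at hrun
      rw [hrun]
      have hresteq : xs.drop tl = seq.drop (i + (tl + 1)) := by
        rw [hxs, List.drop_drop]
        congr 1
        omega
      have hfresh' : xs.drop tl ≠ [] →
          ((1 + (tl : Int) > 0 : Bool)
            && (PySem.List.pyGetD seq ((i : Nat) : Int) 0 == seq.getD (i + (tl + 1)) 0)) = false := by
        intro hne
        have hi2 : i + (tl + 1) < seq.length := by
          by_contra hge
          rw [hresteq, List.drop_eq_nil_of_le (by omega)] at hne
          exact hne rfl
        have hdw : xs.dropWhile (fun y => y == x) ≠ [] := by rw [← hrest]; exact hne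
        have h2 : (xs.dropWhile (fun y => y == x)).head? = some seq[i + (tl + 1)] := by
          rw [← hrest, hresteq, List.drop_eq_getElem_cons hi2]
          rfl
        have h3 : (xs.dropWhile (fun y => y == x)).head hdw = seq[i + (tl + 1)] := by
          have h4 := List.head?_eq_some_head hdw
          rw [h4] at h2
          exact Option.some_inj.mp h2
        have hpf : (seq[i + (tl + 1)] == x) = false := by
          rw [← h3]
          exact List.head_dropWhile_not (fun y => y == x) hdw
        have hb : (PySem.List.pyGetD seq ((i : Nat) : Int) 0 == seq.getD (i + (tl + 1)) 0) = false := by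
          simp only [PySem.List.pyGetD_natCast, hgdi]
          have h5 : seq.getD (i + (tl + 1)) 0 = seq[i + (tl + 1)] := by
            simp [List.getD_eq_getElem?_getD, List.getElem?_eq_getElem hi2]
          rw [h5]
          exact beq_eq_false_iff_ne.mpr fun hc => (beq_eq_false_iff_ne.mp hpf) hc.symm
        rw [hb, Bool.and_false]
      have hrec := ih (xs.drop tl) (i + (tl + 1)) ((i : Nat) : Int) (1 + (tl : Int))
        (if 1 + (tl : Int) > max 1 bL then ((i : Nat) : Int)
          else if (1 : Int) > bL then ((i : Nat) : Int) else bS)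
        (max (1 + (tl : Int)) (max 1 bL))
        (by simp only [List.length_cons] at hn; simp only [List.length_drop]; omega) hresteq hfresh'
      have e0 : ((i : Nat) : Int) + 1 + ((List.replicate tl x).length : Int)
          = (((i + (tl + 1)) : Nat) : Int) := by
        simp only [List.length_replicate]
        push_cast
        ring
      rw [e0, hrec]
      rw [refB, ← htl]
      have hdropc : (x :: xs).drop (1 + tl) = xs.drop tl := by
        rw [Nat.add_comm, List.drop_succ_cons]
      rw [hdropc]
      have e1 : ((i : Nat) : Int) + ((1 + tl : Nat) : Int) = (((i + (tl + 1)) : Nat) : Int) := by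
        push_cast; ring
      have e2 : (if (((1 + tl : Nat) : Int)) > bL then ((i : Nat) : Int) else bS)
          = (if 1 + (tl : Int) > max 1 bL then ((i : Nat) : Int)
             else if (1 : Int) > bL then ((i : Nat) : Int) else bS) := by
        push_cast
        split_ifs <;> first | rfl | omega
      have e3 : max (((1 + tl : Nat) : Int)) bL = max (1 + (tl : Int)) (max 1 bL) := by
        push_cast; omega
      rw [e1, e2, e3]

-- ===== VERDICT (by name: the statement is the Claim_ definition above) =====
theorem find_longest_plateau_spec : Claim_equal_find_longest_plateau := by
  intro seq _
  unfold Spec_find_longest_plateau find_longest_plateau find_longest_plateau_alt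
  have h1 := flp_loop_eq_refA seq 0 0 0
  have h2 := refA_eq_refB (seq.drop 0) 0 0 0
  have h3 := flp_fold_outer seq seq.length seq 0 0 0 0 0 le_rfl (by simp)
    (fun _ => by simp)
  simp only [List.drop_zero] at h1 h2
  simp only [Nat.cast_zero] at h2 h3
  rw [h1, h2, ← h3]
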